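-- pv_equiv track=rewrite | github.com/AyaZhang/AIpractice | hw1/practice.py | nested_parentheses
-- ===== SOURCE A (Python) =====
-- def nested_parentheses(expression):
--     """
--     Must be done recursively.
--     Given a string, return true if it is a nesting of zero or more pairs of parenthesis,
--     like "(())" or "((()))". Suggestion: check the first and last chars,
--     and then recur on what's inside them.
--
--     nestedParentheses("(())")  true
--     nestedParentheses("((()))")  true
--     nestedParentheses("(((x))") false
--
--     Use this link to practice in Java first:
--     http://codingbat.com/prob/p183174
--     """
--     # BEGIN_YOUR_CODE
--     if not expression:
--         return True
--
--     if len(expression) == 1: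
--         return False
--
--     if expression[0] != '(' or expression[-1] != ')':
--         return False
--
--     return nested_parentheses(expression[1:-1])
-- ===== SOURCE B (Python) =====
-- def nested_parentheses(expression):
--     n = len(expression)
--     h, r = divmod(n, 2)
--     return r == 0 and expression[:h] == '(' * h and expression[h:] == ')' * h
-- ===== Notes on version B (the rewrite author's own statement) =====
-- stated objective: simpler
-- what changed: Replaced the recursive peeling of the outer pair by a closed-form check: the string is nested parentheses iff its length is even and it is h opening brackets followed by h closing brackets (h = len/2), compared in one pass with no recursion.
import Mathlib
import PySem

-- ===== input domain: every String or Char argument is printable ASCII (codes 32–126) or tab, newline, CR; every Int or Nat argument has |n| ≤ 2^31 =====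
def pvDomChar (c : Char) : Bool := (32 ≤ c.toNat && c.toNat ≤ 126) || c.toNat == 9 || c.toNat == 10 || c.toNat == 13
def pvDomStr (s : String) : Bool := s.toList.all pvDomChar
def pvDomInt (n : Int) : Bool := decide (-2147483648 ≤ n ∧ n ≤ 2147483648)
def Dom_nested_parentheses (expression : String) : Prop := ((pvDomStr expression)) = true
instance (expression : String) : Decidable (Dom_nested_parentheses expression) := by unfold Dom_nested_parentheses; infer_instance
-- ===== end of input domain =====

-- B replaces A's recursive peeling of the outer pair by a closed-form split-at-the-middle check; objective: simpler.

-- ===== PORT A =====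
-- A's recursion, transliterated on the string's character list
def nestedParensA (l : List Char) : Bool :=
  if l = [] then true                                           -- if not expression: return True
  else if l.length = 1 then false                               -- if len(expression) == 1: return False
  else if PySem.List.pyGet? l 0 ≠ some '(' ∨ PySem.List.pyGet? l (-1) ≠ some ')' then false
  else nestedParensA (PySem.List.slice l (some 1) (some (-1)))  -- recur on expression[1:-1]
termination_by l.length
decreasing_by
  rename_i h0 _ _
  have hp : 1 ≤ l.length := List.length_pos_of_ne_nil h0
  simp [PySem.List.length_slice, PySem.List.clampIdx, h0]
  omega

def nested_parentheses (expression : String) : Bool := nestedParensA expression.toList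

-- ===== PORT B =====
-- B: n = len(expression); h, r = divmod(n, 2); return r == 0 and first half all '(' and second half all ')'
def nested_parentheses_alt (expression : String) : Bool :=
  let l := expression.toList
  let n := l.length
  let h := n / 2
  let r := n % 2
  decide (r = 0) && decide (l.take h = List.replicate h '(') && decide (l.drop h = List.replicate h ')')

-- ===== PRECONDITION & SPEC =====
def Spec_nested_parentheses (expression : String) (out : Bool) : Prop := out = nested_parentheses_alt expression
instance (expression : String) (out : Bool) : Decidable (Spec_nested_parentheses expression out) := by unfold Spec_nested_parentheses; infer_instance

-- ===== CLAIM (what is proved, stated in full; the proofs are below) =====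
def Claim_equal_nested_parentheses : Prop := ∀ (expression : String), Dom_nested_parentheses expression → Spec_nested_parentheses expression (nested_parentheses expression)

-- ===== LEMMAS AND PROOFS =====

-- the meaning both programs decide: k nested pairs
def IsNest (l : List Char) : Prop := ∃ k, l = List.replicate k '(' ++ List.replicate k ')'

theorem rep_pair_succ (k : Nat) :
    List.replicate (k+1) '(' ++ List.replicate (k+1) ')'
      = '(' :: ((List.replicate k '(' ++ List.replicate k ')') ++ [')']) := by
  rw [List.replicate_succ, List.replicate_succ']
  simp

-- B's closed form decides IsNest
theorem npB_true_iff (l : List Char) :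
    ((decide (l.length % 2 = 0) && decide (l.take (l.length / 2) = List.replicate (l.length / 2) '(')
        && decide (l.drop (l.length / 2) = List.replicate (l.length / 2) ')')) = true) ↔ IsNest l := by
  simp only [Bool.and_eq_true, decide_eq_true_eq]
  constructor
  · rintro ⟨⟨_, ht⟩, hd⟩
    exact ⟨l.length / 2, by rw [← ht, ← hd, List.take_append_drop]⟩
  · rintro ⟨k, rfl⟩
    have hlen : (List.replicate k '(' ++ List.replicate k ')').length = 2 * k := by
      simp; omega
    rw [hlen]
    have h3 : 2 * k / 2 = k := by omega
    refine ⟨⟨by omega, ?_⟩, ?_⟩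
    · rw [h3, List.take_append_of_le_length (by simp), List.take_replicate]
      simp
    · rw [h3, List.drop_append_of_le_length (by simp), List.drop_replicate]
      simp

theorem isNest_cons_concat (m : List Char) :
    IsNest ('(' :: (m ++ [')'])) ↔ IsNest m := by
  constructor
  · rintro ⟨k, hk⟩
    obtain ⟨k', rfl⟩ : ∃ k', k = k' + 1 := by
      refine ⟨k - 1, ?_⟩
      rcases Nat.eq_zero_or_pos k with h | h
      · subst h; simp at hk
      · omega
    rw [rep_pair_succ] at hk
    have h2 : m ++ [')'] = (List.replicate k' '(' ++ List.replicate k' ')') ++ [')'] :=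
      (List.cons.injEq _ _ _ _ ▸ hk).2
    exact ⟨k', List.append_cancel_right h2⟩
  · rintro ⟨k, rfl⟩
    exact ⟨k + 1, (rep_pair_succ k).symm⟩

theorem slice_middle (a b : Char) (m : List Char) :
    PySem.List.slice (a :: (m ++ [b])) (some 1) (some (-1)) = m := by
  simp [PySem.List.slice, PySem.List.clampIdx]
  rw [if_neg (by omega)]
  simp

-- A's recursion decides IsNest
theorem npA_true_iff (l : List Char) : nestedParensA l = true ↔ IsNest l := by
  induction l using nestedParensA.induct with
  | case1 =>
    rw [nestedParensA]
    exact ⟨fun _ => ⟨0, rfl⟩, fun _ => rfl⟩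
  | case2 l h0 h1 =>
    rw [nestedParensA]
    simp only [if_neg h0, if_pos h1, Bool.false_eq_true, false_iff]
    rintro ⟨k, rfl⟩
    simp at h1
    omega
  | case3 l h0 h1 h2 =>
    rw [nestedParensA]
    simp only [if_neg h0, if_neg h1, if_pos h2, Bool.false_eq_true, false_iff]
    rintro ⟨k, hk⟩
    obtain ⟨k', rfl⟩ : ∃ k', k = k' + 1 := by
      refine ⟨k - 1, ?_⟩
      rcases Nat.eq_zero_or_pos k with h | h
      · exfalso; subst h hk; exact h0 rfl
      · omega
    rw [rep_pair_succ] at hk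
    subst hk
    rcases h2 with h | h
    · exact h (PySem.List.pyGet?_zero_cons _ _)
    · have : ('(' :: ((List.replicate k' '(' ++ List.replicate k' ')') ++ [')']))
          = ('(' :: (List.replicate k' '(' ++ List.replicate k' ')')) ++ [')'] := by simp
      rw [this, PySem.List.pyGet?_neg_one_append_singleton] at h
      exact h rfl
  | case4 l h0 h1 h2 ih =>
    push Not at h2
    obtain ⟨ha, hb⟩ := h2
    rcases l.eq_nil_or_concat with rfl | ⟨m, b, rfl⟩
    · exact absurd rfl h0
    simp only [List.concat_eq_append] at h0 h1 ha hb ih ⊢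
    rw [PySem.List.pyGet?_neg_one_append_singleton] at hb
    obtain rfl : b = ')' := Option.some.inj hb
    rcases m with _ | ⟨a, m'⟩
    · exfalso; exact h1 (by simp)
    have hl : (a :: m') ++ [')'] = a :: (m' ++ [')']) := by simp
    rw [hl] at ha ih ⊢
    obtain rfl : a = '(' := Option.some.inj ((PySem.List.pyGet?_zero_cons _ _) ▸ ha)
    rw [nestedParensA]
    rw [hl] at h0 h1
    simp only [if_neg h0, if_neg h1]
    rw [if_neg (by
      push Not
      refine ⟨PySem.List.pyGet?_zero_cons _ _, ?_⟩
      rw [← hl]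
      exact PySem.List.pyGet?_neg_one_append_singleton _ _)]
    rw [slice_middle] at ih ⊢
    exact ih.trans (isNest_cons_concat m').symm

theorem main_eq (l : List Char) : nestedParensA l =
    ((decide (l.length % 2 = 0) && decide (l.take (l.length / 2) = List.replicate (l.length / 2) '(')
        && decide (l.drop (l.length / 2) = List.replicate (l.length / 2) ')'))) := by
  rw [← Bool.coe_iff_coe]
  exact (npA_true_iff l).trans (npB_true_iff l).symm

-- ===== VERDICT (by name: the statement is the Claim_ definition above) =====
theorem nested_parentheses_spec : Claim_equal_nested_parentheses := by
  intro e _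
  unfold Spec_nested_parentheses nested_parentheses nested_parentheses_alt
  simpa using main_eq e.toList
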